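-- pv_equiv track=rewrite | github.com/erzhu419/sumo-rl | SUMO_ruiguang/online_control/case/e_8_gurobi_test_considerbusnum_V3.py | keep_first_n_buses
-- ===== SOURCE A (Python) =====
-- from collections import defaultdict
--
-- def keep_first_n_buses(bus_list, n):
--     """每条线路只保留前n个公交车"""
--     route_to_buses = defaultdict(list)
--
--     # 收集每条线路的非零车次（注意按 bus_id 的数字排序）
--     for bus in bus_list:
--         route, bus_id = bus.split('_')
--         if bus_id != '0':
--             route_to_buses[route].append((int(bus_id), bus))
--
--     # 每条线路只保留前 n 个编号小的车次
--     keep_set = set()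
--     for route, buses in route_to_buses.items():
--         # 根据编号排序后取前 n 个
--         sorted_buses = sorted(buses, key=lambda x: x[0])
--         for _, bus in sorted_buses[:n]:
--             keep_set.add(bus)
--
--     # 按原始顺序筛选保留的车次
--     return [bus for bus in bus_list if bus in keep_set]
-- ===== SOURCE B (Python) =====
-- def keep_first_n_buses(bus_list, n):
--     """每条线路只保留前n个公交车 — rank-based selection: no grouping, no sorting.
--     A bus is kept iff fewer than n same-route buses precede it in (id, position) order."""
--     entries = []
--     for i, bus in enumerate(bus_list):
--         route, bus_id = bus.split('_')
--         if bus_id != '0':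
--             entries.append((route, int(bus_id), i, bus))
--     keep = set()
--     for route, bid, i, bus in entries:
--         rank = sum(1 for r2, b2, j, _ in entries
--                    if r2 == route and (b2 < bid or (b2 == bid and j < i)))
--         if rank < n:
--             keep.add(bus)
--     return [bus for bus in bus_list if bus in keep]
-- ===== Notes on version B (the rewrite author's own statement) =====
-- stated objective: alternative
-- what changed: B never groups or sorts: it enumerates the parsed entries once and keeps a bus iff fewer than n same-route entries precede it in (id, position) order (a rank count), instead of building a route dict, sorting each route's list and slicing off the first n.
-- outside the precondition, e.g. on keep_first_n_buses(['a_1', 'a_2'], -1): A returns ['a_1'], B returns []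
import Mathlib
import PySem

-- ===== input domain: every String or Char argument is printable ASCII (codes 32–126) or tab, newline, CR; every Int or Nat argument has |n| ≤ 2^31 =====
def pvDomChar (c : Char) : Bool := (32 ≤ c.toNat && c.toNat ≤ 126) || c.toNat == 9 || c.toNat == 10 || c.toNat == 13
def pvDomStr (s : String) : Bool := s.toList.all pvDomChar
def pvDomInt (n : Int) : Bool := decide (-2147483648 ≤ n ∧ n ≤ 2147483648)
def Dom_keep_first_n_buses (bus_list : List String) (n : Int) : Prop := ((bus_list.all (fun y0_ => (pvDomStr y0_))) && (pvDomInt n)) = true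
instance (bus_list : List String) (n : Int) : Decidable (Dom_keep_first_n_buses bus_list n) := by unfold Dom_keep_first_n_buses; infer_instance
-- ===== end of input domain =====

-- B replaces A's group-by-route dict + per-route sort + slice by a single rank count per
-- parsed entry (a bus is kept iff fewer than n same-route entries precede it in
-- (id, position) order): an alternative algorithm, not claimed faster.

-- ===== PORT A =====
-- route, bus_id = bus.split('_')   (raises unless exactly two parts)
def keepA_split2? (bus : String) : Option (String × String) :=
  match PySem.Str.split? bus "_" with
  | some [route, bus_id] => some (route, bus_id)
  | _ => none

-- first loop: collect each route's non-'0' buses into a defaultdict(list); none = an exception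
def keepA_loop : List String → PySem.Dict String (List (Int × String)) →
    Option (PySem.Dict String (List (Int × String)))
  | [], d => some d
  | bus :: rest, d =>
    match keepA_split2? bus with
    | none => none
    | some (route, bus_id) =>
      if bus_id = "0" then keepA_loop rest d
      else
        match PySem.Int.ofStr? bus_id with
        | none => none
        | some bid => keepA_loop rest (d.modify route [] (fun l => l ++ [(bid, bus)]))

-- second loop: per route, sort by bus id and add the first n bus strings to keep_set
def keepA_keepset (d : PySem.Dict String (List (Int × String))) (n : Int) : PySem.Set String :=
  d.items.foldl (fun ks p =>
    (PySem.List.slice (PySem.List.sorted p.2 (fun x => x.1) false) none (some n)).foldl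
      (fun ks q => PySem.Set.add ks q.2) ks) PySem.Set.empty

def keep_first_n_buses (bus_list : List String) (n : Int) : List String :=
  match keepA_loop bus_list PySem.Dict.empty with
  | none => []   -- Python raises here: outside Pre_
  | some d => bus_list.filter (fun bus => PySem.Set.contains (keepA_keepset d n) bus)

-- ===== PORT B =====
-- route, bus_id = bus.split('_')   (raises unless exactly two parts)
def keepB_parse? (bus : String) : Option (String × String) :=
  match PySem.Str.split? bus "_" with
  | some [route, bus_id] => some (route, bus_id)
  | _ => none

-- first loop: entries = [(route, int(bus_id), position, bus)] for every non-'0' bus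
def keepB_entries : List String → Int → Option (List (String × Int × Int × String))
  | [], _ => some []
  | bus :: rest, i =>
    match keepB_parse? bus with
    | none => none
    | some (route, bus_id) =>
      if bus_id = "0" then keepB_entries rest (i + 1)
      else
        match PySem.Int.ofStr? bus_id with
        | none => none
        | some bid => (keepB_entries rest (i + 1)).map (fun es => (route, bid, i, bus) :: es)

-- rank = sum(1 for r2, b2, j, _ in entries if r2 == route and (b2, j) < (bid, i))
def keepB_rank (es : List (String × Int × Int × String)) (e : String × Int × Int × String) : Int :=
  (es.countP (fun e2 => decide (e2.1 = e.1 ∧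
      (e2.2.1 < e.2.1 ∨ (e2.2.1 = e.2.1 ∧ e2.2.2.1 < e.2.2.1)))) : Int)

def keep_first_n_buses_alt (bus_list : List String) (n : Int) : List String :=
  match keepB_entries bus_list 0 with
  | none => []   -- Python raises here: outside Pre_
  | some es =>
    let keep := es.foldl (fun ks e =>
      if keepB_rank es e < n then PySem.Set.add ks e.2.2.2 else ks) PySem.Set.empty
    bus_list.filter (fun bus => PySem.Set.contains keep bus)

-- ===== PRECONDITION & SPEC =====
-- a bus is well-formed when it splits on '_' into exactly two parts whose second part
-- is '0' or parses as a Python int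
def pvBusOk (bus : String) : Bool :=
  match PySem.Str.split? bus "_" with
  | some [_, bus_id] => bus_id == "0" || (PySem.Int.ofStr? bus_id).isSome
  | _ => false

-- Pre_ excludes (a) inputs with a malformed bus, on which A raises ValueError, and
-- (b) negative n, which is outside the natural domain of 'keep the first n buses'
-- (A's [:n] slice then keeps all but the last |n| buses per route, while B keeps nothing).
def Pre_keep_first_n_buses (bus_list : List String) (n : Int) : Prop :=
  0 ≤ n ∧ ∀ bus ∈ bus_list, pvBusOk bus = true

instance (bus_list : List String) (n : Int) :
    Decidable (Pre_keep_first_n_buses bus_list n) := by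
  unfold Pre_keep_first_n_buses; infer_instance

def pvWitness_keep_first_n_buses : List String × Int := (["r_1", "r_2", "s_3", "r_0"], 1)

def Spec_keep_first_n_buses (bus_list : List String) (n : Int) (out : List String) : Prop :=
  out = keep_first_n_buses_alt bus_list n
instance (bus_list : List String) (n : Int) (out : List String) :
    Decidable (Spec_keep_first_n_buses bus_list n out) := by
  unfold Spec_keep_first_n_buses; infer_instance

-- ===== CLAIM (what is proved, stated in full; the proofs are below) =====
def Claim_equal_keep_first_n_buses : Prop :=
  ∀ (bus_list : List String) (n : Int), Dom_keep_first_n_buses bus_list n →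
    Pre_keep_first_n_buses bus_list n →
    Spec_keep_first_n_buses bus_list n (keep_first_n_buses bus_list n)

-- ===== LEMMAS AND PROOFS =====

-- the value a bus contributes: (route, int(bus_id)), or none for '0'/malformed buses
def pvParse? (bus : String) : Option (String × Int) :=
  match PySem.Str.split? bus "_" with
  | some [route, bus_id] =>
    if bus_id = "0" then none
    else match PySem.Int.ofStr? bus_id with
      | some bid => some (route, bid)
      | none => none
  | _ => none

-- the entry list both first loops compute under Pre_ (position-decorated)
def pvEntries : List String → Int → List (String × Int × Int × String)
  | [], _ => []
  | bus :: rest, i =>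
    match pvParse? bus with
    | some (route, bid) => (route, bid, i, bus) :: pvEntries rest (i + 1)
    | none => pvEntries rest (i + 1)

-- lex-smaller test on (id, position); the route is already fixed by the caller
def pvLexB (e e2 : String × Int × Int × String) : Bool :=
  decide (e2.2.1 < e.2.1 ∨ (e2.2.1 = e.2.1 ∧ e2.2.2.1 < e.2.2.1))

lemma pvB_entries_eq (l : List String) (i : Int) (h : ∀ bus ∈ l, pvBusOk bus = true) :
    keepB_entries l i = some (pvEntries l i) := by
  induction l generalizing i with
  | nil => rfl
  | cons bus rest ih =>
    have hb := h bus (by simp)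
    have hr : ∀ b ∈ rest, pvBusOk b = true := fun b hb2 => h b (by simp [hb2])
    unfold pvBusOk at hb
    simp only [keepB_entries, keepB_parse?, pvEntries, pvParse?]
    rcases hsp : PySem.Str.split? bus "_" with _ | parts <;> rw [hsp] at hb
    · simp at hb
    · match parts with
      | [] => simp at hb
      | [a] => simp at hb
      | a :: b :: c :: t => simp at hb
      | [route, bus_id] =>
        simp only []
        by_cases h0 : bus_id = "0"
        · simp [h0, ih _ hr]
        · simp only [if_neg h0]
          simp at hb
          rcases hof : PySem.Int.ofStr? bus_id with _ | bid
          · rw [hof] at hb; simp [h0] at hb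
          · simp [ih _ hr]

lemma pvA_loop_eq (l : List String) (h : ∀ bus ∈ l, pvBusOk bus = true) :
    ∀ (i : Int) (d : PySem.Dict String (List (Int × String))),
    keepA_loop l d = some ((pvEntries l i).foldl
      (fun d e => d.modify e.1 [] (fun g => g ++ [(e.2.1, e.2.2.2)])) d) := by
  induction l with
  | nil => intro i d; rfl
  | cons bus rest ih =>
    intro i d
    have hb := h bus (by simp)
    have hr : ∀ b ∈ rest, pvBusOk b = true := fun b hb2 => h b (by simp [hb2])
    unfold pvBusOk at hb
    simp only [keepA_loop, keepA_split2?, pvEntries, pvParse?]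
    rcases hsp : PySem.Str.split? bus "_" with _ | parts <;> rw [hsp] at hb
    · simp at hb
    · match parts with
      | [] => simp at hb
      | [a] => simp at hb
      | a :: b :: c :: t => simp at hb
      | [route, bus_id] =>
        simp only []
        by_cases h0 : bus_id = "0"
        · simp only [h0, if_true]
          exact ih hr (i + 1) d
        · simp only [if_neg h0]
          simp at hb
          rcases hof : PySem.Int.ofStr? bus_id with _ | bid
          · rw [hof] at hb; simp [h0] at hb
          · simp only []
            exact ih hr (i + 1) _

lemma pv_groups (E : List (String × Int × Int × String)) (r : String) :
    ((E.foldl (fun d e => d.modify e.1 [] (fun g => g ++ [(e.2.1, e.2.2.2)]))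
        PySem.Dict.empty).getD r []) =
      (E.filter (fun e => e.1 == r)).map (fun e => (e.2.1, e.2.2.2)) := by
  have h1 : E.foldl (fun d e => d.modify e.1 [] (fun g => g ++ [(e.2.1, e.2.2.2)]))
      PySem.Dict.empty
    = (E.map (fun e => (e.1, (e.2.1, e.2.2.2)))).foldl
        (fun d p => d.modify p.1 [] (fun g => g ++ [p.2])) PySem.Dict.empty := by
    rw [List.foldl_map]
  rw [h1, PySem.Dict.getD_foldl_modify_append, List.filter_map, List.map_map]
  simp [PySem.Dict.getD_empty]
  rfl

lemma pv_keys (E : List (String × Int × Int × String)) :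
    ((E.foldl (fun d e => d.modify e.1 [] (fun g => g ++ [(e.2.1, e.2.2.2)]))
        PySem.Dict.empty).keys) = PySem.Set.ofList (E.map (fun e => e.1)) := by
  rw [PySem.Dict.keys_foldl_modify_key E (fun e => e.1) []
    (fun _ e => fun g => g ++ [(e.2.1, e.2.2.2)]) PySem.Dict.empty]
  simp [PySem.Dict.keys_empty, PySem.Set.update_nil_left]

lemma pv_keys_nodup (E : List (String × Int × Int × String)) :
    ((E.foldl (fun d e => d.modify e.1 [] (fun g => g ++ [(e.2.1, e.2.2.2)]))
        PySem.Dict.empty).keys).Nodup := by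
  exact PySem.Dict.nodup_keys_foldl_modify_key E (fun e => e.1) []
    (fun _ e => fun g => g ++ [(e.2.1, e.2.2.2)]) PySem.Dict.empty
    (by simp [PySem.Dict.keys_empty])

lemma pv_mem_nested {α : Type} [BEq α] [LawfulBEq α] {β γ : Type}
    (items : List β) (g : β → List γ) (f : γ → α) (init : PySem.Set α) (s : α) :
    s ∈ items.foldl (fun ks p => (g p).foldl (fun ks q => PySem.Set.add ks (f q)) ks) init ↔
      s ∈ init ∨ ∃ p ∈ items, ∃ q ∈ g p, s = f q := by
  induction items generalizing init with
  | nil => simp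
  | cons p items ih =>
    rw [List.foldl_cons, ih, PySem.Set.mem_foldl_add]
    simp [or_assoc]

lemma pv_mem_condfold {α : Type} [BEq α] [LawfulBEq α] {β : Type}
    (l : List β) (c : β → Prop) [DecidablePred c] (f : β → α) (init : PySem.Set α) (s : α) :
    s ∈ l.foldl (fun ks e => if c e then PySem.Set.add ks (f e) else ks) init ↔
      s ∈ init ∨ ∃ e ∈ l, c e ∧ s = f e := by
  induction l generalizing init with
  | nil => simp
  | cons e l ih =>
    rw [List.foldl_cons, ih]
    by_cases hc : c e
    · simp [hc, PySem.Set.mem_add, or_assoc]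
    · simp [hc]

lemma pv_sorted_append {α κ : Type} [LinearOrder κ] (l : List α) (x : α) (key : α → κ) :
    PySem.List.sorted (l ++ [x]) key false =
      PySem.List.insertBy (fun a b => decide (key a < key b)) x
        (PySem.List.sorted l key false) := by
  rw [PySem.List.sorted_eq_foldl_insertBy, PySem.List.sorted_eq_foldl_insertBy,
    List.foldl_append]
  rfl

lemma pv_insertBy_eq {α : Type} (bef : α → α → Bool) (x : α) (S : List α) :
    PySem.List.insertBy bef x S =
      S.takeWhile (fun y => !bef x y) ++ x :: S.dropWhile (fun y => !bef x y) := by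
  induction S with
  | nil => rfl
  | cons y ys ih =>
    rw [show PySem.List.insertBy bef x (y :: ys)
        = if bef x y then x :: y :: ys else y :: PySem.List.insertBy bef x ys from rfl]
    by_cases hb : bef x y
    · simp [hb]
    · have hb' : bef x y = false := by simpa using hb
      simp [hb', ih]

lemma pv_map_insertBy {α β : Type} (bef : α → α → Bool) (bef' : β → β → Bool) (g : α → β)
    (x : α) (ys : List α) (h : ∀ y, bef x y = bef' (g x) (g y)) :
    (PySem.List.insertBy bef x ys).map g =
      PySem.List.insertBy bef' (g x) (ys.map g) := by
  induction ys with
  | nil => rfl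
  | cons y ys ih =>
    rw [show PySem.List.insertBy bef x (y :: ys)
        = if bef x y then x :: y :: ys else y :: PySem.List.insertBy bef x ys from rfl]
    rw [show PySem.List.insertBy bef' (g x) ((y :: ys).map g)
        = if bef' (g x) (g y) then g x :: g y :: ys.map g
          else g y :: PySem.List.insertBy bef' (g x) (ys.map g) from rfl]
    rw [← h y]
    by_cases hb : bef x y
    · simp [hb]
    · have hb' : bef x y = false := by simpa using hb
      simp [hb', ih]

lemma pv_sorted_map {α β κ : Type} [LinearOrder κ] (F : List α) (g : α → β) (k : β → κ) :
    PySem.List.sorted (F.map g) k false =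
      (PySem.List.sorted F (fun e => k (g e)) false).map g := by
  rw [PySem.List.sorted_eq_foldl_insertBy, PySem.List.sorted_eq_foldl_insertBy,
    List.foldl_map]
  suffices h : ∀ (acc : List α),
      (F.foldl (fun acc e =>
        PySem.List.insertBy (fun a b => decide (k (g a) < k (g b))) e acc) acc).map g =
      F.foldl (fun acc e =>
        PySem.List.insertBy (fun a b => decide (k a < k b)) (g e) acc) (acc.map g) by
    exact (h []).symm
  induction F with
  | nil => intro acc; rfl
  | cons e F ih =>
    intro acc
    rw [List.foldl_cons, List.foldl_cons, ih,
      pv_map_insertBy _ (fun a b => decide (k a < k b)) g e acc (fun y => rfl)]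

lemma pv_takeWhile_sorted {α : Type} (S : List α) (key : α → Int) (c : Int)
    (h : S.Pairwise (fun a b => key a ≤ key b)) :
    S.takeWhile (fun y => decide (key y ≤ c)) = S.filter (fun y => decide (key y ≤ c)) := by
  induction S with
  | nil => rfl
  | cons a S ih =>
    rw [List.pairwise_cons] at h
    by_cases ha : key a ≤ c
    · simp only [List.takeWhile_cons, List.filter_cons, decide_eq_true ha]
      simp [ih h.2]
    · have hd : decide (key a ≤ c) = false := by simpa using ha
      simp only [List.takeWhile_cons, List.filter_cons, hd, Bool.false_eq_true, if_false]
      symm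
      rw [List.filter_eq_nil_iff]
      intro b hb
      have hab := h.1 b hb
      simp only [decide_eq_true_eq]
      omega

lemma pv_countP_lt {α : Type} (l : List α) (r p : α → Bool)
    (h : ∀ a ∈ l, r a = true → p a = true) (e : α) (he : e ∈ l) (hp : p e = true)
    (hr : r e = false) : l.countP r < l.countP p := by
  induction l with
  | nil => cases he
  | cons a t ih =>
    rw [List.countP_cons, List.countP_cons]
    have hmono : t.countP r ≤ t.countP p :=
      List.countP_mono_left (fun b hb => h b (List.mem_cons_of_mem a hb))
    rcases List.mem_cons.mp he with rfl | he'
    · rw [hr, hp]; simp; omega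
    · have hlt := ih (fun b hb => h b (List.mem_cons_of_mem a hb)) he'
      have hha := h a (List.mem_cons_self)
      cases hra : r a
      · cases hpa : p a <;> simp <;> omega
      · rw [hha hra]; simp; omega

lemma pv_entries_ge (l : List String) : ∀ i : Int, ∀ e ∈ pvEntries l i, i ≤ e.2.2.1 := by
  induction l with
  | nil => intro i e he; simp [pvEntries] at he
  | cons bus rest ih =>
    intro i e he
    simp only [pvEntries] at he
    cases hp : pvParse? bus <;> rw [hp] at he
    · have := ih (i + 1) e he; omega
    · rename_i val
      rcases List.mem_cons.mp he with rfl | he'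
      · simp
      · have := ih (i + 1) e he'; omega

lemma pv_entries_pairwise (l : List String) (i : Int) :
    (pvEntries l i).Pairwise (fun a b => a.2.2.1 < b.2.2.1) := by
  induction l generalizing i with
  | nil => simp [pvEntries]
  | cons bus rest ih =>
    simp only [pvEntries]
    cases hp : pvParse? bus
    · exact ih (i + 1)
    · rename_i val
      refine List.pairwise_cons.mpr ⟨?_, ih (i + 1)⟩
      intro b hb
      have := pv_entries_ge rest (i + 1) b hb
      simp; omega

lemma pv_core (F : List (String × Int × Int × String)) :
    F.Pairwise (fun a b => a.2.2.1 < b.2.2.1) → ∀ (m : Nat)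
      (P : (String × Int × Int × String) → Prop),
    ((∃ q ∈ (PySem.List.sorted F (fun e => e.2.1) false).take m, P q) ↔
      (∃ e ∈ F, F.countP (pvLexB e) < m ∧ P e)) := by
  induction F using List.reverseRecOn with
  | nil =>
    intro _ m P
    simp [show PySem.List.sorted ([] : List (String × Int × Int × String))
      (fun e => e.2.1) false = [] from rfl]
  | append_singleton l x ih =>
    intro hF m P
    rw [List.pairwise_append] at hF
    obtain ⟨hl, -, hxi⟩ := hF
    have hxi' : ∀ e ∈ l, e.2.2.1 < x.2.2.1 := fun e he => hxi e he x (by simp)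
    have IH := ih hl
    set S := PySem.List.sorted l (fun e => e.2.1) false with hS
    set pc : (String × Int × Int × String) → Bool := fun y => decide (y.2.1 ≤ x.2.1)
      with hpc
    have hfun : (fun y : String × Int × Int × String =>
        !(decide (x.2.1 < y.2.1))) = pc := by
      funext y; by_cases h : x.2.1 < y.2.1 <;> simp [h, hpc, Int.not_lt.mp]
    have hins : PySem.List.insertBy (fun a b => decide (a.2.1 < b.2.1)) x S
        = S.takeWhile pc ++ x :: S.dropWhile pc := by
      rw [pv_insertBy_eq]
      rw [show (fun y : String × Int × Int × String =>
        !(fun a b : String × Int × Int × String => decide (a.2.1 < b.2.1)) x y) = pc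
        from hfun]
    set T1 := S.takeWhile pc with hT1
    set D1 := S.dropWhile pc with hD1
    have hSplit : T1 ++ D1 = S := List.takeWhile_append_dropWhile
    have hTfil : T1 = S.filter pc :=
      pv_takeWhile_sorted S (fun e => e.2.1) x.2.1
        (PySem.List.sorted_pairwise l (fun e => e.2.1))
    set j := l.countP pc with hj
    have hlenT : T1.length = j := by
      rw [hTfil, ← List.countP_eq_length_filter]
      exact ((PySem.List.sorted_perm l (fun e => e.2.1) false).countP_eq pc)
    have hsapp : PySem.List.sorted (l ++ [x]) (fun e => e.2.1) false = T1 ++ x :: D1 := by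
      rw [pv_sorted_append l x (fun e => e.2.1), ← hS]
      exact hins
    have htake : (PySem.List.sorted (l ++ [x]) (fun e => e.2.1) false).take m
        = T1.take m ++ (x :: D1).take (m - j) := by
      rw [hsapp, List.take_append, hlenT]
    -- rank facts
    have hrankx : (l ++ [x]).countP (pvLexB x) = j := by
      rw [List.countP_append, List.countP_singleton]
      have h2 : pvLexB x x = false := by simp [pvLexB]
      rw [h2]
      have h3 : l.countP (pvLexB x) = l.countP pc :=
        List.countP_congr (fun e he => by
          have := hxi' e he
          simp only [pvLexB, hpc, decide_eq_true_eq]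
          constructor
          · rintro (h | ⟨h, -⟩) <;> omega
          · intro h
            rcases lt_or_eq_of_le h with h' | h'
            · exact Or.inl h'
            · exact Or.inr ⟨h', this⟩)
      simp [h3]
      exact hj.symm
    have hranke : ∀ e ∈ l, (l ++ [x]).countP (pvLexB e)
        = l.countP (pvLexB e) + (if x.2.1 < e.2.1 then 1 else 0) := by
      intro e he
      rw [List.countP_append, List.countP_singleton]
      congr 1
      have := hxi' e he
      by_cases hxe : x.2.1 < e.2.1
      · simp [pvLexB, hxe]
      · simp [pvLexB, hxe]; omega
    have hge : ∀ e ∈ l, x.2.1 < e.2.1 → j ≤ l.countP (pvLexB e) := by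
      intro e he hxe
      exact List.countP_mono_left (fun a _ hpa => by
        simp only [hpc, decide_eq_true_eq] at hpa
        simp only [pvLexB, decide_eq_true_eq]
        omega)
    by_cases hjm : m ≤ j
    · -- m ≤ j : x is not taken, ranks unchanged where it matters
      have h1 : (x :: D1).take (m - j) = [] := by
        rw [Nat.sub_eq_zero_of_le hjm]; rfl
      have hSm : S.take m = T1.take m := by
        rw [← hSplit, List.take_append, hlenT, Nat.sub_eq_zero_of_le hjm]
        simp
      rw [htake, h1, List.append_nil, ← hSm, IH m P]
      constructor
      · rintro ⟨e, he, hc, hP⟩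
        refine ⟨e, by simp [he], ?_, hP⟩
        rw [hranke e he]
        by_cases hxe : x.2.1 < e.2.1
        · exact absurd (lt_of_le_of_lt (le_trans hjm (hge e he hxe)) hc) (lt_irrefl _)
        · simp [hxe]; exact hc
      · rintro ⟨e, he, hc, hP⟩
        rcases List.mem_append.mp he with he' | he'
        · refine ⟨e, he', ?_, hP⟩
          rw [hranke e he'] at hc
          by_cases hxe : x.2.1 < e.2.1
          · have := hge e he' hxe; simp [hxe] at hc; omega
          · simp [hxe] at hc; exact hc
        · rw [List.mem_singleton.mp he'] at hc
          rw [hrankx] at hc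
          exact absurd hc (by omega)
    · -- j < m : x is taken, old ranks shift by the x-comparison
      have hjm' : j < m := by omega
      have hTfull : T1.take m = T1 := List.take_of_length_le (by omega)
      have h2' : (x :: D1).take (m - j) = x :: D1.take (m - j - 1) := by
        have h3' : m - j = (m - j - 1) + 1 := by omega
        rw [h3']; rfl
      have hSm1 : S.take (m - 1) = T1 ++ D1.take (m - 1 - j) := by
        rw [← hSplit, List.take_append, hlenT, List.take_of_length_le (by omega)]
      have hmm : m - j - 1 = m - 1 - j := by omega
      have hlt0 : ∀ e ∈ l, ¬x.2.1 < e.2.1 → l.countP (pvLexB e) < j := by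
        intro e he hxe
        exact pv_countP_lt l (pvLexB e) pc
          (fun a _ ha => by
            simp only [pvLexB, decide_eq_true_eq] at ha
            simp only [hpc, decide_eq_true_eq]
            omega)
          e he (by simp only [hpc, decide_eq_true_eq]; omega)
          (by simp [pvLexB])
      have hLHS : (∃ q ∈ T1 ++ x :: D1.take (m - 1 - j), P q)
          ↔ P x ∨ (∃ q ∈ S.take (m - 1), P q) := by
        rw [hSm1]
        constructor
        · rintro ⟨q, hq, hP⟩
          rcases List.mem_append.mp hq with h | h
          · exact Or.inr ⟨q, List.mem_append.mpr (Or.inl h), hP⟩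
          · rcases List.mem_cons.mp h with rfl | h
            · exact Or.inl hP
            · exact Or.inr ⟨q, List.mem_append.mpr (Or.inr h), hP⟩
        · rintro (hP | ⟨q, hq, hP⟩)
          · exact ⟨x, by simp, hP⟩
          · rcases List.mem_append.mp hq with h | h
            · exact ⟨q, List.mem_append.mpr (Or.inl h), hP⟩
            · exact ⟨q, List.mem_append.mpr (Or.inr (List.mem_cons_of_mem x h)), hP⟩
      rw [htake, hTfull, h2', hmm, hLHS, IH (m - 1) P]
      constructor
      · rintro (hP | ⟨e, he, hc, hP⟩)
        · exact ⟨x, by simp, by rw [hrankx]; omega, hP⟩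
        · refine ⟨e, by simp [he], ?_, hP⟩
          rw [hranke e he]
          by_cases hxe : x.2.1 < e.2.1
          · simp only [hxe, if_true]; omega
          · simp only [hxe, if_false]
            have := hlt0 e he hxe
            omega
      · rintro ⟨e, he, hc, hP⟩
        rcases List.mem_append.mp he with he' | he'
        · refine Or.inr ⟨e, he', ?_, hP⟩
          rw [hranke e he'] at hc
          by_cases hxe : x.2.1 < e.2.1
          · simp only [hxe, if_true] at hc; omega
          · have := hlt0 e he' hxe
            omega
        · rw [List.mem_singleton.mp he'] at hP
          exact Or.inl hP

lemma pv_memA (d : PySem.Dict String (List (Int × String))) (n : Int) (s : String) :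
    s ∈ keepA_keepset d n ↔
      ∃ p ∈ d.items, ∃ q ∈ PySem.List.slice (PySem.List.sorted p.2 (fun x => x.1) false)
        none (some n), s = q.2 := by
  unfold keepA_keepset
  rw [pv_mem_nested]
  simp [PySem.Set.empty]

lemma pv_memB (E : List (String × Int × Int × String)) (n : Int) (s : String) :
    s ∈ E.foldl (fun ks e =>
        if keepB_rank E e < n then PySem.Set.add ks e.2.2.2 else ks) PySem.Set.empty ↔
      ∃ e ∈ E, keepB_rank E e < n ∧ s = e.2.2.2 := by
  rw [pv_mem_condfold E (fun e => keepB_rank E e < n) (fun e => e.2.2.2)]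
  simp [PySem.Set.empty]

lemma pv_rank_bridge (E : List (String × Int × Int × String))
    (e : String × Int × Int × String) (n : Int) (hn : 0 ≤ n) :
    (keepB_rank E e < n ↔
      (E.filter (fun e2 => e2.1 == e.1)).countP (pvLexB e) < n.toNat) := by
  unfold keepB_rank
  rw [List.countP_filter]
  have h1 : E.countP (fun e2 => pvLexB e e2 && (e2.1 == e.1))
      = E.countP (fun e2 => decide (e2.1 = e.1 ∧
        (e2.2.1 < e.2.1 ∨ (e2.2.1 = e.2.1 ∧ e2.2.2.1 < e.2.2.1)))) :=
    List.countP_congr (fun e2 _ => by simp [pvLexB, and_comm])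
  rw [h1]
  omega

lemma pv_route (E : List (String × Int × Int × String))
    (hpw : E.Pairwise (fun a b => a.2.2.1 < b.2.2.1)) (r : String) (n : Int) (hn : 0 ≤ n)
    (s : String) :
    ((∃ q ∈ PySem.List.slice (PySem.List.sorted
        ((E.filter (fun e => e.1 == r)).map (fun e => (e.2.1, e.2.2.2)))
        (fun x => x.1) false) none (some n), s = q.2) ↔
      ∃ e ∈ E.filter (fun e => e.1 == r),
        (E.filter (fun e => e.1 == r)).countP (pvLexB e) < n.toNat ∧ s = e.2.2.2) := by
  set F := E.filter (fun e => e.1 == r) with hF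
  have hFpw : F.Pairwise (fun a b => a.2.2.1 < b.2.2.1) :=
    List.Pairwise.sublist (List.filter_sublist) hpw
  rw [PySem.List.slice_to _ hn,
    pv_sorted_map F (fun e => (e.2.1, e.2.2.2)) (fun x : Int × String => x.1),
    ← List.map_take]
  have hcore := pv_core F hFpw n.toNat (fun e => s = e.2.2.2)
  constructor
  · rintro ⟨q, hq, rfl⟩
    obtain ⟨e, he, rfl⟩ := List.mem_map.mp hq
    exact hcore.mp ⟨e, he, rfl⟩
  · intro h
    obtain ⟨q, hq, hs⟩ := hcore.mpr h
    exact ⟨(q.2.1, q.2.2.2), List.mem_map_of_mem hq, hs⟩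

theorem pv_main (bus_list : List String) (n : Int) (hn : 0 ≤ n)
    (hok : ∀ bus ∈ bus_list, pvBusOk bus = true) :
    keep_first_n_buses bus_list n = keep_first_n_buses_alt bus_list n := by
  unfold keep_first_n_buses keep_first_n_buses_alt
  rw [pvA_loop_eq bus_list hok 0 PySem.Dict.empty, pvB_entries_eq bus_list 0 hok]
  simp only []
  set E := pvEntries bus_list 0 with hE
  set D := E.foldl (fun d e => d.modify e.1 [] (fun g => g ++ [(e.2.1, e.2.2.2)]))
    PySem.Dict.empty with hD
  have hpw : E.Pairwise (fun a b => a.2.2.1 < b.2.2.1) := pv_entries_pairwise bus_list 0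
  have hnodup : D.keys.Nodup := pv_keys_nodup E
  have hmem : ∀ s : String, s ∈ keepA_keepset D n ↔
      s ∈ E.foldl (fun ks e =>
        if keepB_rank E e < n then PySem.Set.add ks e.2.2.2 else ks) PySem.Set.empty := by
    intro s
    rw [pv_memA, pv_memB,
      PySem.Dict.items_eq_map_keys D hnodup ([] : List (Int × String))]
    constructor
    · rintro ⟨p, hp, q, hq, hs⟩
      obtain ⟨r, hr, rfl⟩ := List.mem_map.mp hp
      simp only [hD] at hq
      rw [pv_groups E r] at hq
      obtain ⟨e, heF, hcnt, hs'⟩ := (pv_route E hpw r n hn s).mp ⟨q, hq, hs⟩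
      have heE : e ∈ E := List.mem_of_mem_filter heF
      have her : e.1 = r := by
        have := List.of_mem_filter heF; simpa using this
      refine ⟨e, heE, ?_, hs'⟩
      rw [pv_rank_bridge E e n hn]
      rwa [her]
    · rintro ⟨e, he, hrank, hs⟩
      refine ⟨(e.1, D.getD e.1 []), ?_, ?_⟩
      · refine List.mem_map.mpr ⟨e.1, ?_, rfl⟩
        rw [hD, pv_keys E]
        exact (PySem.Set.mem_ofList _ _).mpr (List.mem_map_of_mem he)
      · simp only [hD]
        rw [pv_groups E e.1]
        refine (pv_route E hpw e.1 n hn s).mpr ⟨e, ?_, ?_, hs⟩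
        · exact List.mem_filter.mpr ⟨he, by simp⟩
        · rw [← pv_rank_bridge E e n hn]; exact hrank
  apply List.filter_congr
  intro bus _
  have h1 := PySem.Set.contains_iff (keepA_keepset D n) bus
  have h2 := PySem.Set.contains_iff (E.foldl (fun ks e =>
        if keepB_rank E e < n then PySem.Set.add ks e.2.2.2 else ks) PySem.Set.empty) bus
  rw [Bool.eq_iff_iff, h1, h2]
  exact hmem bus

-- ===== VERDICT (by name: the statement is the Claim_ definition above) =====
theorem keep_first_n_buses_spec : Claim_equal_keep_first_n_buses := by
  intro bus_list n _ hpre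
  unfold Spec_keep_first_n_buses
  exact pv_main bus_list n hpre.1 hpre.2
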